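-- pv_equiv track=rewrite | github.com/rolandshoemaker/common-sh | quick-doc.py | dissemble_preamble
-- ===== SOURCE A (Python) =====
-- DESC_PRE = "# desc: "
--
-- USAGE_PRE = "# usage: "
--
-- REQUIRE_PRE = "# requires: "
--
-- def dissemble_preamble(preamble):
-- 	description = []
-- 	usage = []
-- 	requirements = []
-- 	for p in preamble:
-- 		if p.startswith(DESC_PRE):
-- 			description.append(p[len(DESC_PRE):])
-- 		elif p.startswith(USAGE_PRE):
-- 			usage.append(p[len(USAGE_PRE):])
-- 		elif p.startswith(REQUIRE_PRE):
-- 			requirements.append(p[len(REQUIRE_PRE):])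
-- 	return description, usage, requirements
-- ===== SOURCE B (Python) =====
-- DESC_PRE = "# desc: "
--
-- USAGE_PRE = "# usage: "
--
-- REQUIRE_PRE = "# requires: "
--
-- def dissemble_preamble(preamble):
-- 	def grab(prefix):
-- 		return [p[len(prefix):] for p in preamble if p.startswith(prefix)]
-- 	return grab(DESC_PRE), grab(USAGE_PRE), grab(REQUIRE_PRE)
-- ===== Notes on version B (the rewrite author's own statement) =====
-- stated objective: idiomatic
-- what changed: Replaces the single loop with a stateful if/elif cascade and three mutable accumulators by three independent comprehension passes (filter-by-prefix, strip prefix), one per category; correct because the three prefixes are pairwise non-prefixes of each other, so the passes are disjoint.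
import Mathlib
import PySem

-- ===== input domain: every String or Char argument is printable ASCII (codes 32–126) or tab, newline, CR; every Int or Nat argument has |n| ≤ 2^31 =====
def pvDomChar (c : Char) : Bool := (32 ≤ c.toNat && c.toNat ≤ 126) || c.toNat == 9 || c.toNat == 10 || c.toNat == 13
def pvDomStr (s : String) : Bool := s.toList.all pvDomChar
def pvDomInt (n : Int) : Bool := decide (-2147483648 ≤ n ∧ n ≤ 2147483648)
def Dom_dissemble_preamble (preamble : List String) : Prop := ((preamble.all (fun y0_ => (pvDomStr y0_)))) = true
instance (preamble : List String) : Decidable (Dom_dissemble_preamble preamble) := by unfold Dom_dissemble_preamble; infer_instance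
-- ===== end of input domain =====

-- B replaces A's single stateful if/elif loop by three independent filter-and-strip passes (idiomatic; same cost).

def DESC_PRE : String := "# desc: "
def USAGE_PRE : String := "# usage: "
def REQUIRE_PRE : String := "# requires: "

-- ===== PORT A =====
def dissemble_preamble (preamble : List String) : List String × List String × List String :=
  preamble.foldl (fun acc p =>
    if PySem.Str.startswith p DESC_PRE then
      (acc.1 ++ [PySem.Str.slice p (some (PySem.Str.len DESC_PRE)) none], acc.2.1, acc.2.2)
    else if PySem.Str.startswith p USAGE_PRE then
      (acc.1, acc.2.1 ++ [PySem.Str.slice p (some (PySem.Str.len USAGE_PRE)) none], acc.2.2)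
    else if PySem.Str.startswith p REQUIRE_PRE then
      (acc.1, acc.2.1, acc.2.2 ++ [PySem.Str.slice p (some (PySem.Str.len REQUIRE_PRE)) none])
    else acc) ([], [], [])

-- ===== PORT B =====
def pvGrab (pre : String) (preamble : List String) : List String :=
  (preamble.filter (fun p => PySem.Str.startswith p pre)).map
    (fun p => PySem.Str.slice p (some (PySem.Str.len pre)) none)

def dissemble_preamble_alt (preamble : List String) : List String × List String × List String :=
  (pvGrab DESC_PRE preamble, pvGrab USAGE_PRE preamble, pvGrab REQUIRE_PRE preamble)

-- ===== PRECONDITION & SPEC =====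
def Spec_dissemble_preamble (preamble : List String) (out : List String × List String × List String) : Prop := out = dissemble_preamble_alt preamble
instance (preamble : List String) (out : List String × List String × List String) : Decidable (Spec_dissemble_preamble preamble out) := by unfold Spec_dissemble_preamble; infer_instance

-- ===== CLAIM (what is proved, stated in full; the proofs are below) =====
def Claim_equal_dissemble_preamble : Prop := ∀ (preamble : List String), Dom_dissemble_preamble preamble → Spec_dissemble_preamble preamble (dissemble_preamble preamble)

-- ===== LEMMAS AND PROOFS =====

-- if s starts with p, and neither of p, q is a prefix of the other, then s does not start with q
theorem pv_sw_disj (s : String) (p q : String)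
    (hpq : ¬ p.toList <+: q.toList) (hqp : ¬ q.toList <+: p.toList)
    (h : PySem.Str.startswith s p = true) : PySem.Str.startswith s q = false := by
  by_contra hq
  rw [Bool.not_eq_false] at hq
  simp only [PySem.Str.startswith_eq, PySem.Chars.startswith_iff] at h hq
  rcases List.prefix_or_prefix_of_prefix h hq with h' | h'
  · exact hpq h'
  · exact hqp h'

theorem pv_foldl_eq (l : List String) (d u r : List String) :
    l.foldl (fun acc p =>
      if PySem.Str.startswith p DESC_PRE then
        (acc.1 ++ [PySem.Str.slice p (some (PySem.Str.len DESC_PRE)) none], acc.2.1, acc.2.2)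
      else if PySem.Str.startswith p USAGE_PRE then
        (acc.1, acc.2.1 ++ [PySem.Str.slice p (some (PySem.Str.len USAGE_PRE)) none], acc.2.2)
      else if PySem.Str.startswith p REQUIRE_PRE then
        (acc.1, acc.2.1, acc.2.2 ++ [PySem.Str.slice p (some (PySem.Str.len REQUIRE_PRE)) none])
      else acc) (d, u, r)
    = (d ++ pvGrab DESC_PRE l, u ++ pvGrab USAGE_PRE l, r ++ pvGrab REQUIRE_PRE l) := by
  induction l generalizing d u r with
  | nil => simp [pvGrab]
  | cons p t ih =>
    simp only [List.foldl_cons]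
    by_cases hd : PySem.Str.startswith p DESC_PRE = true
    · have hu := pv_sw_disj p DESC_PRE USAGE_PRE (by decide) (by decide) hd
      have hr := pv_sw_disj p DESC_PRE REQUIRE_PRE (by decide) (by decide) hd
      rw [if_pos hd, ih]
      rw [PySem.Str.startswith_eq] at hd hu hr
      simp [hd, hu, hr, pvGrab, List.filter_cons]
    · by_cases hu : PySem.Str.startswith p USAGE_PRE = true
      · have hr := pv_sw_disj p USAGE_PRE REQUIRE_PRE (by decide) (by decide) hu
        rw [if_neg hd, if_pos hu, ih]
        rw [PySem.Str.startswith_eq] at hd hu hr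
        simp [hd, hu, hr, pvGrab, List.filter_cons]
      · by_cases hr : PySem.Str.startswith p REQUIRE_PRE = true
        · rw [if_neg hd, if_neg hu, if_pos hr, ih]
          rw [PySem.Str.startswith_eq] at hd hu hr
          simp [hd, hu, hr, pvGrab, List.filter_cons]
        · rw [if_neg hd, if_neg hu, if_neg hr, ih]
          rw [PySem.Str.startswith_eq] at hd hu hr
          simp [hd, hu, hr, pvGrab, List.filter_cons]

-- ===== VERDICT (by name: the statement is the Claim_ definition above) =====
theorem dissemble_preamble_spec : Claim_equal_dissemble_preamble := by
  intro preamble _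
  unfold Spec_dissemble_preamble dissemble_preamble dissemble_preamble_alt
  simpa using pv_foldl_eq preamble [] [] []
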